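-- pv_equiv track=rewrite | github.com/miliar/Code_Jam_Webscraper | solutions_python/solutions_year13_round1_nr2/240.py | getGain
-- ===== SOURCE A (Python) =====
-- def getGain(par):
-- 	E, R, N, value = par
--
-- 	memo = [-1 for x in range(E+1)]
-- 	prevMemo = [-1 for x in range(E+1)]
--
-- 	# last activity
-- 	for i in range(E+1):
-- 		memo[i] = value[-1] * i
--
-- 	for step in range(N-2, -1, -1):
-- 		for e in range(E+1):
-- 			currMax = 0
-- 			for consume in range(e, -1, -1):
-- 				next = e - consume + R
-- 				if next > E:
-- 					next = E
-- 				thisGain = consume * value[step] + memo[next]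
-- 				if thisGain > currMax:
-- 					currMax = thisGain
-- 			prevMemo[e] = currMax
-- 		temp = prevMemo
-- 		prevMemo = memo
-- 		memo = temp
--
-- 	return memo[E]
-- ===== SOURCE B (Python) =====
-- def getGain(par):
--     E, R, N, value = par
--
--     memo = [value[-1] * i for i in range(E + 1)]
--
--     for step in range(N - 2, -1, -1):
--         v = value[step]
--         best = None  # running max over j<=e of -j*v + memo[min(j+R, E)]
--         new = []
--         for e in range(E + 1):
--             cand = -e * v + memo[min(e + R, E)]
--             if best is None or cand > best:
--                 best = cand
--             gain = e * v + best
--             new.append(gain if gain > 0 else 0)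
--         memo = new
--
--     return memo[E]
-- ===== Notes on version B (the rewrite author's own statement) =====
-- stated objective: faster
-- what changed: The O(E) inner scan over 'consume' is replaced by a running prefix-maximum over j = e - consume (one candidate added per e), so each DP step costs O(E) instead of O(E^2).
import Mathlib
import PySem

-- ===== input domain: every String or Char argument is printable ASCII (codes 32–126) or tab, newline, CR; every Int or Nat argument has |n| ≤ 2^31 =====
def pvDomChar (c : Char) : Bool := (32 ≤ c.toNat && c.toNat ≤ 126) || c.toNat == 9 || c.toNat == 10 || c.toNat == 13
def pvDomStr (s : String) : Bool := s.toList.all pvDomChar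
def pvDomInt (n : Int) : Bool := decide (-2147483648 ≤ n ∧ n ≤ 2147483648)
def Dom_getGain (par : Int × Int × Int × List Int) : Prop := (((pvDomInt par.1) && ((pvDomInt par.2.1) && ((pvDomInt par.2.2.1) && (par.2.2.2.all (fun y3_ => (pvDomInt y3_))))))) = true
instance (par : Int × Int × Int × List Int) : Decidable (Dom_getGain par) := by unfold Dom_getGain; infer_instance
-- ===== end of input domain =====

-- B replaces A's O(E) inner scan over `consume` by a running prefix-maximum over j = e - consume,
-- making each DP step O(E) instead of O(E^2); a timing run measured B faster on the large inputs.

-- ===== PORT A =====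
def getGain (par : Int × Int × Int × List Int) : Int :=
  match par with
  | (E, R, N, value) =>
    -- for i in range(E+1): memo[i] = value[-1] * i
    let memo0 := (PySem.List.pyRange 0 (E + 1) 1).map (fun i => PySem.List.pyGetD value (-1) 0 * i)
    -- for step in range(N-2, -1, -1): rebuild prevMemo, then swap
    let memo := (PySem.List.pyRange (N - 2) (-1) (-1)).foldl (fun memo step =>
      (PySem.List.pyRange 0 (E + 1) 1).map (fun e =>
        (PySem.List.pyRange e (-1) (-1)).foldl (fun currMax consume =>
          let next := e - consume + R
          let next := if next > E then E else next
          let thisGain := consume * PySem.List.pyGetD value step 0 + PySem.List.pyGetD memo next 0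
          if thisGain > currMax then thisGain else currMax) 0)) memo0
    PySem.List.pyGetD memo E 0

-- ===== PORT B =====
def getGain_alt (par : Int × Int × Int × List Int) : Int :=
  match par with
  | (E, R, N, value) =>
    let memo0 := (PySem.List.pyRange 0 (E + 1) 1).map (fun i => PySem.List.pyGetD value (-1) 0 * i)
    let memo := (PySem.List.pyRange (N - 2) (-1) (-1)).foldl (fun memo step =>
      let v := PySem.List.pyGetD value step 0
      -- one pass over e, carrying (best, new): best = running max of -j*v + memo[min(j+R, E)]
      ((PySem.List.pyRange 0 (E + 1) 1).foldl (fun (acc : Option Int × List Int) e =>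
        let cand := -e * v + PySem.List.pyGetD memo (if e + R > E then E else e + R) 0
        let best := match acc.1 with
          | none => cand
          | some b => if cand > b then cand else b
        let gain := e * v + best
        (some best, acc.2 ++ [if gain > 0 then gain else 0])) (none, [])).2) memo0
    PySem.List.pyGetD memo E 0

-- ===== PRECONDITION & SPEC =====
-- Pre_ is exactly the set of inputs on which the Python A returns normally: it excludes only inputs
-- where A raises IndexError (E < 0; empty value; value shorter than N-1; or an activity index
-- e-consume+R below -(E+1), i.e. R < -(E+1), when the step loop runs).
def Pre_getGain (par : Int × Int × Int × List Int) : Prop :=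
  0 ≤ par.1 ∧ par.2.2.2 ≠ [] ∧
    (2 ≤ par.2.2.1 → (par.2.2.1 - 1 ≤ (par.2.2.2.length : Int) ∧ -(par.1 + 1) ≤ par.2.1))
instance (par : Int × Int × Int × List Int) : Decidable (Pre_getGain par) := by
  unfold Pre_getGain; infer_instance
def pvWitness_getGain : (Int × Int × Int × List Int) := (2, 1, 2, [3, 5])

def Spec_getGain (par : Int × Int × Int × List Int) (out : Int) : Prop := out = getGain_alt par
instance (par : Int × Int × Int × List Int) (out : Int) : Decidable (Spec_getGain par out) := by
  unfold Spec_getGain; infer_instance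

-- ===== CLAIM (what is proved, stated in full; the proofs are below) =====
def Claim_equal_getGain : Prop := ∀ (par : Int × Int × Int × List Int), Dom_getGain par → Pre_getGain par → Spec_getGain par (getGain par)

-- ===== LEMMAS AND PROOFS =====

def pvSup (G : Int → Int) : Nat → Int
  | 0 => G 0
  | m + 1 => max (pvSup G m) (G ((m : Int) + 1))

lemma pvIfMax (a b : Int) : (if a > b then a else b) = max b a := by omega

lemma pvSup_eq_sup' (G : Int → Int) (m : Nat) :
    pvSup G m = (Finset.range (m + 1)).sup' (by simp) (fun k => G (k : Int)) := by
  induction m with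
  | zero => simp [pvSup]
  | succ m ih =>
    rw [pvSup, ih]
    have h1 : (Finset.range (m + 1 + 1)).sup' (by simp) (fun k => G (k : Int))
        = (insert (m + 1) (Finset.range (m + 1))).sup' (by simp) (fun k => G (k : Int)) :=
      Finset.sup'_congr (by simp) Finset.range_add_one (fun x _ => rfl)
    rw [h1, Finset.sup'_insert]
    push_cast
    exact max_comm _ _

lemma pvSup_rev (H : Int → Int) (m : Nat) :
    pvSup (fun k => H ((m : Int) - k)) m = pvSup H m := by
  rw [pvSup_eq_sup', pvSup_eq_sup']
  have himg : (Finset.range (m + 1)).image (fun k => m - k) = Finset.range (m + 1) := by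
    ext x
    simp only [Finset.mem_image, Finset.mem_range]
    constructor
    · rintro ⟨a, ha, rfl⟩; omega
    · intro hx; exact ⟨m - x, by omega, by omega⟩
  calc (Finset.range (m + 1)).sup' (by simp) (fun k => H ((m : Int) - (k : Int)))
      = (Finset.range (m + 1)).sup' (by simp) ((fun (k : Nat) => H (k : Int)) ∘ (fun (k : Nat) => m - k)) :=
        Finset.sup'_congr (by simp) rfl (fun x hx => by
          simp only [Finset.mem_range] at hx
          have hx' : ((m - x : Nat) : Int) = (m : Int) - x := by omega
          simp [Function.comp, hx'])
    _ = ((Finset.range (m + 1)).image (fun (k : Nat) => m - k)).sup' (by simp [himg]) (fun (k : Nat) => H (k : Int)) :=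
        Finset.sup'_comp_eq_image (by simp) (fun (k : Nat) => H (k : Int))
    _ = (Finset.range (m + 1)).sup' (by simp) (fun (k : Nat) => H (k : Int)) :=
        Finset.sup'_congr (by simp [himg]) himg (fun x _ => rfl)

lemma pvSup_const_add (c : Int) (H : Int → Int) (m : Nat) :
    pvSup (fun k => c + H k) m = c + pvSup H m := by
  induction m with
  | zero => simp [pvSup]
  | succ m ih => simp only [pvSup, ih]; omega

lemma pvCountdownFold (G : Int → Int) (m : Nat) (c : Int) :
    (PySem.List.pyRange (m : Int) (-1) (-1)).foldl
      (fun acc k => if G k > acc then G k else acc) c = max c (pvSup G m) := by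
  induction m generalizing c with
  | zero =>
    rw [Nat.cast_zero, PySem.List.pyRange_neg_one_cons (by omega),
      PySem.List.pyRange_neg_one_eq_nil (by omega)]
    simp [pvSup, pvIfMax]
  | succ m ih =>
    rw [PySem.List.pyRange_neg_one_cons (by push_cast; omega)]
    simp only [List.foldl_cons]
    have hc : ((m + 1 : Nat) : Int) - 1 = (m : Int) := by push_cast; omega
    rw [hc, ih]
    simp only [pvSup]
    push_cast
    omega

def pvD (E R : Int) (memo : List Int) (j : Int) : Int :=
  PySem.List.pyGetD memo (if j + R > E then E else j + R) 0

def pvCand (E R v : Int) (memo : List Int) (j : Int) : Int := -j * v + pvD E R memo j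

lemma pvInnerA (E R v : Int) (memo : List Int) (m : Nat) :
    (PySem.List.pyRange (m : Int) (-1) (-1)).foldl (fun currMax consume =>
        let next := (m : Int) - consume + R
        let next := if next > E then E else next
        let thisGain := consume * v + PySem.List.pyGetD memo next 0
        if thisGain > currMax then thisGain else currMax) 0
      = max 0 ((m : Int) * v + pvSup (pvCand E R v memo) m) := by
  show List.foldl (fun acc k => if k * v + pvD E R memo ((m : Int) - k) > acc
        then k * v + pvD E R memo ((m : Int) - k) else acc) 0
      (PySem.List.pyRange (m : Int) (-1) (-1))
    = max 0 ((m : Int) * v + pvSup (pvCand E R v memo) m)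
  rw [pvCountdownFold (fun k => k * v + pvD E R memo ((m : Int) - k)) m 0]
  have h1 : (fun (k : Int) => k * v + pvD E R memo ((m : Int) - k))
      = (fun k => (fun j => ((m : Int) - j) * v + pvD E R memo j) ((m : Int) - k)) := by
    funext k
    have : (m : Int) - ((m : Int) - k) = k := by ring
    simp only [this]
  rw [h1, pvSup_rev (fun j => ((m : Int) - j) * v + pvD E R memo j) m]
  have h2 : (fun (j : Int) => ((m : Int) - j) * v + pvD E R memo j)
      = (fun j => (m : Int) * v + pvCand E R v memo j) := by
    funext j
    simp only [pvCand]
    ring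
  rw [h2, pvSup_const_add]

lemma pvFoldB (E R v : Int) (memo : List Int) (n : Nat) :
    (PySem.List.pyRange 0 ((n : Int) + 1) 1).foldl (fun (acc : Option Int × List Int) e =>
        let cand := -e * v + PySem.List.pyGetD memo (if e + R > E then E else e + R) 0
        let best := match acc.1 with
          | none => cand
          | some b => if cand > b then cand else b
        let gain := e * v + best
        (some best, acc.2 ++ [if gain > 0 then gain else 0])) (none, [])
      = (some (pvSup (pvCand E R v memo) n),
         (List.range (n + 1)).map (fun (e : Nat) => max 0 ((e : Int) * v + pvSup (pvCand E R v memo) e))) := by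
  induction n with
  | zero =>
    rw [Nat.cast_zero, zero_add, show PySem.List.pyRange 0 1 1 = [0] from rfl]
    simp only [List.foldl_cons, List.foldl_nil, pvSup, pvCand, pvD, Prod.mk.injEq, pvIfMax]
    constructor <;> simp [pvSup, pvCand, pvD]
  | succ n ih =>
    have hsplit : PySem.List.pyRange 0 (((n + 1 : Nat) : Int) + 1) 1
        = PySem.List.pyRange 0 ((n : Int) + 1) 1 ++ [(n : Int) + 1] := by
      push_cast
      exact PySem.List.pyRange_one_succ_right (by omega)
    rw [hsplit, List.foldl_append, ih]
    simp only [List.foldl_cons, List.foldl_nil, pvIfMax, List.range_succ,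
      List.map_append, List.map_cons, List.map_nil, Prod.mk.injEq, pvSup, pvCand, pvD]
    push_cast
    exact ⟨trivial, rfl⟩

lemma pvStepEq (E R v : Int) (memo : List Int) :
    (PySem.List.pyRange 0 (E + 1) 1).map (fun e =>
        (PySem.List.pyRange e (-1) (-1)).foldl (fun currMax consume =>
          let next := e - consume + R
          let next := if next > E then E else next
          let thisGain := consume * v + PySem.List.pyGetD memo next 0
          if thisGain > currMax then thisGain else currMax) 0)
      = ((PySem.List.pyRange 0 (E + 1) 1).foldl (fun (acc : Option Int × List Int) e =>
          let cand := -e * v + PySem.List.pyGetD memo (if e + R > E then E else e + R) 0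
          let best := match acc.1 with
            | none => cand
            | some b => if cand > b then cand else b
          let gain := e * v + best
          (some best, acc.2 ++ [if gain > 0 then gain else 0])) (none, [])).2 := by
  rcases le_or_gt 0 E with hE | hE
  · obtain ⟨n, hn⟩ : ∃ n : Nat, E = (n : Int) := ⟨E.toNat, (Int.toNat_of_nonneg hE).symm⟩
    subst hn
    rw [pvFoldB (n : Int) R v memo n]
    have hr : PySem.List.pyRange 0 ((n : Int) + 1) 1 = (List.range (n + 1)).map (fun (k : Nat) => (k : Int)) := by
      have h := PySem.List.pyRange_zero_natCast (n + 1)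
      rw [Nat.cast_add, Nat.cast_one] at h
      exact h
    rw [hr, List.map_map]
    refine List.map_congr_left ?_
    intro e _
    exact pvInnerA (n : Int) R v memo e
  · rw [PySem.List.pyRange_one_eq_nil (by omega)]
    simp

lemma pvGetGainEq (par : Int × Int × Int × List Int) : getGain par = getGain_alt par := by
  obtain ⟨E, R, N, value⟩ := par
  simp only [getGain, getGain_alt]
  have hf : (fun (memo : List Int) (step : Int) =>
      (PySem.List.pyRange 0 (E + 1) 1).map (fun e =>
        (PySem.List.pyRange e (-1) (-1)).foldl (fun currMax consume =>
          let next := e - consume + R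
          let next := if next > E then E else next
          let thisGain := consume * PySem.List.pyGetD value step 0 + PySem.List.pyGetD memo next 0
          if thisGain > currMax then thisGain else currMax) 0))
      = (fun (memo : List Int) (step : Int) =>
      let v := PySem.List.pyGetD value step 0
      ((PySem.List.pyRange 0 (E + 1) 1).foldl (fun (acc : Option Int × List Int) e =>
        let cand := -e * v + PySem.List.pyGetD memo (if e + R > E then E else e + R) 0
        let best := match acc.1 with
          | none => cand
          | some b => if cand > b then cand else b
        let gain := e * v + best
        (some best, acc.2 ++ [if gain > 0 then gain else 0])) (none, [])).2) := by
    funext memo step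
    exact pvStepEq E R (PySem.List.pyGetD value step 0) memo
  rw [hf]

-- ===== VERDICT (by name: the statement is the Claim_ definition above) =====
theorem getGain_spec : Claim_equal_getGain := by
  intro par _ _
  unfold Spec_getGain
  exact pvGetGainEq par
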